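-- pv_equiv track=rewrite | github.com/carterbancroft/cryptopals | set1/6.py | get_keylength_chunks
-- ===== SOURCE A (Python) =====
-- def get_keylength_chunks(keylength, data):
--     chunks = dict.fromkeys(range(keylength))
--     i = 0
--     for byte in data:
--         if (i == keylength): i = 0
--
--         if (chunks[i] == None): chunks[i] = []
--
--         chunks[i].append(byte)
--
--         i += 1
--
--     return chunks
-- ===== SOURCE B (Python) =====
-- def get_keylength_chunks(keylength, data):
--     return {
--         i: [byte for j, byte in enumerate(data) if j % keylength == i] or None
--         for i in range(keylength)
--     }
-- ===== Notes on version B (the rewrite author's own statement) =====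
-- stated objective: idiomatic
-- what changed: A's single round-robin pass mutating a dict with a wrapping counter is replaced by a dict comprehension that builds each bucket independently by filtering its residue class (index % keylength == i), with 'or None' keeping untouched buckets as None.
-- outside the precondition, e.g. on get_keylength_chunks(0, [7]): A raises KeyError, B returns {}
-- crash fix: On keylength <= 0 with nonempty data, A raises KeyError (the first chunks[0] lookup hits the empty dict built from the empty range); B returns the empty dict. — e.g. on get_keylength_chunks(0, [7]): A raises KeyError, B returns []
import Mathlib
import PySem

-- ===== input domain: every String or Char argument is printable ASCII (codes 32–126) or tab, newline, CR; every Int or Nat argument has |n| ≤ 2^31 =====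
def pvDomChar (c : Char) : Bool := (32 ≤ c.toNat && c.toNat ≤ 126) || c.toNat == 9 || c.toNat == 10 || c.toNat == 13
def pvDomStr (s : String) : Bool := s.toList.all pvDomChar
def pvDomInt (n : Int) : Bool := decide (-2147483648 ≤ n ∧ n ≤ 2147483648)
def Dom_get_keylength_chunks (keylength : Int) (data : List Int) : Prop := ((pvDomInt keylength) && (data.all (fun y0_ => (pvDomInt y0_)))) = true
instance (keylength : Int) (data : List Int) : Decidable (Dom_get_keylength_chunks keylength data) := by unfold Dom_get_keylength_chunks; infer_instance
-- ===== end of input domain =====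

-- B replaces A's single round-robin pass (mutable dict + wrapping counter) by a per-bucket
-- dict comprehension filtering each residue class; objective: idiomatic (no speed claim).

-- ===== PORT A =====
-- chunks[i] (KeyError outside Pre_) is ported as getD, exact whenever the key is present
def get_keylength_chunks (keylength : Int) (data : List Int) : List (Int × Option (List Int)) :=
  -- chunks = dict.fromkeys(range(keylength))
  let chunks : PySem.Dict Int (Option (List Int)) :=
    (PySem.List.pyRange 0 keylength 1).foldl (fun d j => PySem.Dict.insert d j none) PySem.Dict.empty
  let r := data.foldl
    (fun (st : PySem.Dict Int (Option (List Int)) × Int) byte =>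
      let i := if st.2 == keylength then 0 else st.2
      -- if chunks[i] == None: chunks[i] = []  /  chunks[i].append(byte)
      let cur := (PySem.Dict.getD st.1 i none).getD []
      (PySem.Dict.insert st.1 i (some (cur ++ [byte])), i + 1))
    (chunks, 0)
  r.1.items

-- ===== PORT B =====
def get_keylength_chunks_alt (keylength : Int) (data : List Int) : List (Int × Option (List Int)) :=
  (PySem.List.pyRange 0 keylength 1).map (fun i =>
    let col := ((PySem.List.enumerate data 0).filter
        (fun p => PySem.Int.mod p.1 keylength == i)).map (·.2)
    (i, if col == [] then none else some col))

-- ===== PRECONDITION & SPEC =====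
-- Pre_ excludes exactly the inputs on which A raises KeyError: keylength ≤ 0 with nonempty
-- data (the first chunks[0] lookup hits the empty dict built from the empty range).
def Pre_get_keylength_chunks (keylength : Int) (data : List Int) : Prop :=
  1 ≤ keylength ∨ data = []
instance (keylength : Int) (data : List Int) : Decidable (Pre_get_keylength_chunks keylength data) := by unfold Pre_get_keylength_chunks; infer_instance

def pvWitness_get_keylength_chunks : Int × List Int := (3, [10, 20, 30, 40])

-- On inputs with keylength ≤ 0 and nonempty data, A raises KeyError; B returns the empty dict.
def Raises_get_keylength_chunks (keylength : Int) (data : List Int) : Prop :=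
  keylength ≤ 0 ∧ data ≠ []
instance (keylength : Int) (data : List Int) : Decidable (Raises_get_keylength_chunks keylength data) := by unfold Raises_get_keylength_chunks; infer_instance
def pvRaiseWitness_get_keylength_chunks : Int × List Int := (0, [7])
def pvRaiseWitnessOut_get_keylength_chunks : List (Int × Option (List Int)) := []

def Spec_get_keylength_chunks (keylength : Int) (data : List Int) (out : List (Int × Option (List Int))) : Prop := out = get_keylength_chunks_alt keylength data
instance (keylength : Int) (data : List Int) (out : List (Int × Option (List Int))) : Decidable (Spec_get_keylength_chunks keylength data out) := by unfold Spec_get_keylength_chunks; infer_instance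

-- ===== CLAIM (what is proved, stated in full; the proofs are below) =====
def Claim_equal_get_keylength_chunks : Prop := ∀ (keylength : Int) (data : List Int), Dom_get_keylength_chunks keylength data → Pre_get_keylength_chunks keylength data → Spec_get_keylength_chunks keylength data (get_keylength_chunks keylength data)

def Claim_raises_get_keylength_chunks : Prop := (∀ (keylength : Int) (data : List Int), Dom_get_keylength_chunks keylength data → Raises_get_keylength_chunks keylength data → ¬ Pre_get_keylength_chunks keylength data) ∧ (Dom_get_keylength_chunks (pvRaiseWitness_get_keylength_chunks.1) (pvRaiseWitness_get_keylength_chunks.2) ∧ Raises_get_keylength_chunks (pvRaiseWitness_get_keylength_chunks.1) (pvRaiseWitness_get_keylength_chunks.2) ∧ get_keylength_chunks_alt (pvRaiseWitness_get_keylength_chunks.1) (pvRaiseWitness_get_keylength_chunks.2) = pvRaiseWitnessOut_get_keylength_chunks)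

-- ===== LEMMAS AND PROOFS =====

-- the bytes of xs at 0-based positions ≡ m (mod k), for 0 ≤ m < k
def pvCol (m k : Nat) : List Int → List Int
  | [] => []
  | x :: xs => if m = 0 then x :: pvCol (k - 1) k xs else pvCol (m - 1) k xs

-- merge a bucket's current value with the arriving column bytes (None stays None only if nothing arrives)
def pvComb (o : Option (List Int)) (l : List Int) : Option (List Int) :=
  if l = [] then o else some (o.getD [] ++ l)

theorem pvComb_push (o : Option (List Int)) (x : Int) (l : List Int) :
    pvComb (some (o.getD [] ++ [x])) l = pvComb o (x :: l) := by
  cases l <;> simp [pvComb]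

theorem pvEmodSmall (a k : Int) (_hk : 0 < k) (h1 : -k < a) (h2 : a < k) :
    a % k = if 0 ≤ a then a else a + k := by
  split_ifs with h
  · exact Int.emod_eq_of_lt h h2
  · rw [show a % k = (a + k) % k from (Int.add_emod_right a k).symm,
      Int.emod_eq_of_lt (by omega) (by omega)]

theorem pvEmodZeroIff (s i k : Int) (hk : 0 < k) (hi1 : 0 ≤ i) (hi2 : i < k) :
    ((i - s) % k = 0) ↔ s % k = i := by
  have hs1 := Int.emod_nonneg s (by omega : k ≠ 0)
  have hs2 := Int.emod_lt_of_pos s hk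
  rw [Int.sub_emod, Int.emod_eq_of_lt hi1 hi2,
    pvEmodSmall (i - s % k) k hk (by omega) (by omega)]
  split_ifs <;> omega

theorem pvEmodShift (a k : Int) : (a - 1) % k = (a % k - 1) % k := by
  have h := Int.mul_ediv_add_emod a k
  calc (a - 1) % k = (a % k - 1 + k * (a / k)) % k := by
        rw [show a % k - 1 + k * (a / k) = a - 1 by omega]
    _ = (a % k - 1) % k := Int.add_mul_emod_self_left (a % k - 1) k (a / k)

theorem pvEmodStep0 (a k : Int) (hk : 0 < k) (h : a % k = 0) : (a - 1) % k = k - 1 := by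
  rw [pvEmodShift, h]
  rcases eq_or_lt_of_le (by omega : (1 : Int) ≤ k) with h1 | h1
  · simp [← h1]
  · rw [pvEmodSmall (0 - 1) k hk (by omega) (by omega)]; split_ifs <;> omega

theorem pvEmodStepPos (a k : Int) (hk : 0 < k) (h : a % k ≠ 0) : (a - 1) % k = a % k - 1 := by
  have hs1 := Int.emod_nonneg a (by omega : k ≠ 0)
  have hs2 := Int.emod_lt_of_pos a hk
  rw [pvEmodShift, Int.emod_eq_of_lt (by omega) (by omega)]

-- getD on a dict whose items are a key list mapped through (j, f j)
theorem pvGetD (ks : List Int) (f : Int → Option (List Int)) (i : Int) (h : i ∈ ks) :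
    (PySem.Dict.mk (ks.map (fun j => (j, f j)))).getD i none = f i := by
  induction ks with
  | nil => cases h
  | cons a ks ih =>
    rw [List.map_cons, PySem.Dict.getD_eq_get?_getD, PySem.Dict.get?_mk_cons]
    by_cases ha : a = i
    · simp [ha]
    · have hi : i ∈ ks := by
        rcases List.mem_cons.mp h with h' | h'
        · exact absurd h'.symm ha
        · exact h'
      rw [if_neg (by simp [ha]), ← PySem.Dict.getD_eq_get?_getD]
      exact ih hi

-- insert at an existing key on such a dict updates the mapped function pointwise
theorem pvInsert (ks : List Int) (f : Int → Option (List Int)) (i : Int) (h : i ∈ ks)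
    (v : Option (List Int)) :
    (PySem.Dict.mk (ks.map (fun j => (j, f j)))).insert i v
      = PySem.Dict.mk (ks.map (fun j => (j, if j = i then v else f j))) := by
  have hc : (PySem.Dict.mk (ks.map (fun j => (j, f j)))).contains i = true := by
    rw [PySem.Dict.contains_iff_mem_keys]
    simp only [PySem.Dict.keys, List.map_map]
    simpa using h
  apply PySem.Dict.ext
  rw [PySem.Dict.items_insert_of_contains _ _ hc]
  show List.map _ (ks.map (fun j => (j, f j))) = _
  rw [List.map_map]
  apply List.map_congr_left
  intro j _
  by_cases hj : j = i <;> simp [hj]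

-- dict.fromkeys(range(k)) builds exactly the mapped dict
theorem pvFromkeys (k : Int) :
    (PySem.List.pyRange 0 k 1).foldl (fun d j => PySem.Dict.insert d j none) PySem.Dict.empty
      = PySem.Dict.mk ((PySem.List.pyRange 0 k 1).map
          (fun j => (j, (none : Option (List Int))))) := by
  apply PySem.Dict.ext
  rw [PySem.Dict.items_foldl_insert_fresh (PySem.List.pyRange 0 k 1) (fun a => a)
    (fun _ => none) PySem.Dict.empty (by intro a _; simp)
    (by simpa using PySem.List.nodup_pyRange_one 0 k)]
  simp [PySem.Dict.empty]

-- A's loop, characterised: each bucket j collects the column of its residue class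
theorem pvFold (k : Int) (hk : 0 < k) (xs : List Int) :
    ∀ (i : Int) (f : Int → Option (List Int)), 0 ≤ i → i ≤ k →
    (xs.foldl
      (fun (st : PySem.Dict Int (Option (List Int)) × Int) byte =>
        let i := if st.2 == k then 0 else st.2
        let cur := (PySem.Dict.getD st.1 i none).getD []
        (PySem.Dict.insert st.1 i (some (cur ++ [byte])), i + 1))
      (PySem.Dict.mk ((PySem.List.pyRange 0 k 1).map (fun j => (j, f j))), i)).1
    = PySem.Dict.mk ((PySem.List.pyRange 0 k 1).map
        (fun j => (j, pvComb (f j) (pvCol ((j - i) % k).toNat k.toNat xs)))) := by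
  induction xs with
  | nil =>
    intro i f _ _
    simp [pvComb, pvCol]
  | cons x xs ih =>
    intro i f h0 h1
    rw [List.foldl_cons]
    dsimp only
    have hsplit : (if (i == k) = true then (0 : Int) else i) = if i = k then 0 else i := by
      simp
    rw [hsplit]
    generalize hgen : (if i = k then (0 : Int) else i) = i'
    have hb1 : 0 ≤ i' := by rw [← hgen]; split <;> omega
    have hb2 : i' < k := by rw [← hgen]; split <;> omega
    have hmem : i' ∈ PySem.List.pyRange 0 k 1 := PySem.List.mem_pyRange_one.mpr ⟨hb1, hb2⟩
    have hii' : ∀ j : Int, (j - i) % k = (j - i') % k := by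
      intro j
      rw [← hgen]
      split
      · next h => rw [h, sub_zero, Int.sub_emod_right]
      · rfl
    rw [pvGetD _ f i' hmem, pvInsert _ f i' hmem _,
      ih (i' + 1) _ (by omega) (by omega)]
    congr 1
    apply List.map_congr_left
    intro j hj
    rcases PySem.List.mem_pyRange_one.mp hj with ⟨hj0, hj1⟩
    rw [hii' j]
    by_cases hji : j = i'
    · have e0 : (j - i') % k = 0 := by rw [hji]; simp
      have e1 : (j - (i' + 1)) % k = k - 1 := by
        rw [show j - (i' + 1) = j - i' - 1 by ring, pvEmodStep0 _ _ hk e0]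
      rw [e1, e0, if_pos hji, hji]
      rw [show ((0 : Int)).toNat = 0 from rfl,
        show ((k - 1 : Int)).toNat = k.toNat - 1 from by omega,
        show pvCol 0 k.toNat (x :: xs) = x :: pvCol (k.toNat - 1) k.toNat xs from by
          simp [pvCol]]
      exact congrArg (Prod.mk i') (pvComb_push (f i') x _)
    · have hne : (j - i') % k ≠ 0 := by
        intro h
        have h2 := (pvEmodZeroIff i' j k hk hj0 hj1).mp h
        rw [Int.emod_eq_of_lt hb1 hb2] at h2
        exact hji h2.symm
      have hm1 := Int.emod_nonneg (j - i') (by omega : k ≠ 0)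
      have hm2 := Int.emod_lt_of_pos (j - i') hk
      have e1 : (j - (i' + 1)) % k = (j - i') % k - 1 := by
        rw [show j - (i' + 1) = j - i' - 1 by ring, pvEmodStepPos _ _ hk hne]
      have e3 : ((j - i') % k).toNat ≠ 0 := by omega
      rw [e1, if_neg hji,
        show ((j - i') % k - 1).toNat = ((j - i') % k).toNat - 1 from by omega,
        show pvCol (((j - i') % k).toNat) k.toNat (x :: xs)
            = pvCol (((j - i') % k).toNat - 1) k.toNat xs from by simp [pvCol, e3]]

-- B's comprehension, characterised: filtering residue class i from start s is a column
theorem pvAltCol (k : Int) (hk : 0 < k) (i : Int) (hi1 : 0 ≤ i) (hi2 : i < k)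
    (xs : List Int) :
    ∀ (s : Int),
    ((PySem.List.enumerate xs s).filter (fun p => PySem.Int.mod p.1 k == i)).map (·.2)
      = pvCol ((i - s) % k).toNat k.toNat xs := by
  induction xs with
  | nil => intro s; simp [PySem.List.enumerate, pvCol]
  | cons x xs ih =>
    intro s
    rw [PySem.List.enumerate_cons, List.filter_cons]
    have hmod : PySem.Int.mod s k = s % k := by
      show Int.fmod s k = s % k
      rw [Int.fmod_eq_emod]; simp [le_of_lt hk]
    by_cases hc : s % k = i
    · have e0 : (i - s) % k = 0 := (pvEmodZeroIff s i k hk hi1 hi2).mpr hc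
      have e1 : (i - (s + 1)) % k = k - 1 := by
        rw [show i - (s + 1) = i - s - 1 by ring, pvEmodStep0 _ _ hk e0]
      rw [if_pos (by simp [hmod, hc]), List.map_cons, ih (s + 1), e1, e0,
        show ((0 : Int)).toNat = 0 from rfl,
        show ((k - 1 : Int)).toNat = k.toNat - 1 from by omega,
        show pvCol 0 k.toNat (x :: xs) = x :: pvCol (k.toNat - 1) k.toNat xs from by
          simp [pvCol]]
    · have hne : (i - s) % k ≠ 0 := fun h => hc ((pvEmodZeroIff s i k hk hi1 hi2).mp h)
      have hm1 := Int.emod_nonneg (i - s) (by omega : k ≠ 0)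
      have e1 : (i - (s + 1)) % k = (i - s) % k - 1 := by
        rw [show i - (s + 1) = i - s - 1 by ring, pvEmodStepPos _ _ hk hne]
      have e3 : ((i - s) % k).toNat ≠ 0 := by omega
      rw [if_neg (by simp [hmod, hc]), ih (s + 1), e1,
        show ((i - s) % k - 1).toNat = ((i - s) % k).toNat - 1 from by omega,
        show pvCol (((i - s) % k).toNat) k.toNat (x :: xs)
            = pvCol (((i - s) % k).toNat - 1) k.toNat xs from by simp [pvCol, e3]]

-- ===== VERDICT (by name: the statement is the Claim_ definition above) =====
theorem get_keylength_chunks_spec : Claim_equal_get_keylength_chunks := by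
  intro k data _ hpre
  unfold Spec_get_keylength_chunks get_keylength_chunks get_keylength_chunks_alt
  dsimp only
  by_cases hk : 1 ≤ k
  · rw [pvFromkeys, pvFold k (by omega) data 0 (fun _ => none) le_rfl (by omega)]
    show List.map _ _ = _
    apply List.map_congr_left
    intro j hj
    rcases PySem.List.mem_pyRange_one.mp hj with ⟨hj0, hj1⟩
    rw [pvAltCol k (by omega) j hj0 hj1 data 0,
      show (j - 0) % k = j from by rw [sub_zero, Int.emod_eq_of_lt hj0 hj1]]
    generalize pvCol j.toNat k.toNat data = c
    cases c <;> simp [pvComb]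
  · rcases hpre with h | h
    · omega
    · subst h
      rw [PySem.List.pyRange_one_eq_nil (by omega)]
      simp [PySem.Dict.empty, PySem.List.enumerate]

@[simp]
theorem get_keylength_chunks_raises : Claim_raises_get_keylength_chunks := by
  unfold Claim_raises_get_keylength_chunks
  constructor
  · intro k d _ hr hp
    rcases hr with ⟨h1, h2⟩
    rcases hp with h | h
    · omega
    · exact h2 h
  · refine ⟨by decide, by decide, by decide⟩
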